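-- pv_equiv track=rewrite | github.com/shinkeonkim/boj-solution-archiving-site | data/source/29891_76219538.py | f
-- ===== SOURCE A (Python) =====
-- def f(l, k):
--     n = len(l)
--     l.sort(reverse=True)
--
--     ans = 0
--     mx = 0
--
--     for i in range(n):
--         mx = max(mx, l[i])
--
--         if (i + 1) % k == 0:
--             ans += mx * 2
--             mx = 0
--
--     ans += mx * 2
--     return ans
-- ===== SOURCE B (Python) =====
-- def f(l, k):
--     l.sort(reverse=True)
--     return 2 * sum(max(l[i], 0) for i in range(0, len(l), k))
-- ===== Notes on version B (the rewrite author's own statement) =====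
-- stated objective: simpler
-- what changed: Instead of scanning all n elements with a running group-maximum and reset logic, B uses the descending-sort invariant: each group's (0-clamped) maximum is its first element, so it sums max(l[i],0) over the strided indices 0, k, 2k, ... directly.
-- outside the precondition, e.g. on f([3, 1], -2): A returns 6, B returns 0; on f([1], 0): A raises ZeroDivisionError, B raises ValueError
import Mathlib
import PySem

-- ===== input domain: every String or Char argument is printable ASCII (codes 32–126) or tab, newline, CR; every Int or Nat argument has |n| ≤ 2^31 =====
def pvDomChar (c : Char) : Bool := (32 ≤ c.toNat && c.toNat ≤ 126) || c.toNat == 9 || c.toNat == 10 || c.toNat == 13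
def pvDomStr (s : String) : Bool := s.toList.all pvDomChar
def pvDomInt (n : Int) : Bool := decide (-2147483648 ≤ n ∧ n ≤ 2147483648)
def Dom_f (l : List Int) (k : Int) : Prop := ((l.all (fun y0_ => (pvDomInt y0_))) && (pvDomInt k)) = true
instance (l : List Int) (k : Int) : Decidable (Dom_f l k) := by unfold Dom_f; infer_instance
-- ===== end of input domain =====

-- B replaces A's full scan with a running group-maximum by a direct strided sum of the
-- group leaders of the descending-sorted list (return-value equivalence; both Pythons
-- sort the argument in place, an observable mutation that is identical in A and B).

-- ===== PORT A =====
def f (l : List Int) (k : Int) : Int :=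
  let n : Int := (l.length : Int)
  let s := PySem.List.sorted l (fun x => x) true
  let st := (PySem.List.pyRange 0 n 1).foldl
    (fun (p : Int × Int) (i : Int) =>
      let mx := max p.2 (PySem.List.pyGetD s i 0)
      if PySem.Int.mod (i + 1) k = 0 then (p.1 + mx * 2, 0) else (p.1, mx))
    (0, 0)
  st.1 + st.2 * 2

-- ===== PORT B =====
def f_alt (l : List Int) (k : Int) : Int :=
  let s := PySem.List.sorted l (fun x => x) true
  2 * ((PySem.List.pyRange 0 (s.length : Int) k).map
        (fun i => max (PySem.List.pyGetD s i 0) 0)).sum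

-- ===== PRECONDITION & SPEC =====
-- Pre_ restricts to the natural domain of a positive group size k ≥ 1: at k = 0 A raises
-- ZeroDivisionError (and B ValueError), and for negative k — a nonsensical group size —
-- A's value is an accident of Python's sign-of-divisor modulo while B's range is empty.
def Pre_f (l : List Int) (k : Int) : Prop := 1 ≤ k
instance (l : List Int) (k : Int) : Decidable (Pre_f l k) := by unfold Pre_f; infer_instance
def pvWitness_f : List Int × Int := ([3, 1, 2], 2)
def Spec_f (l : List Int) (k : Int) (out : Int) : Prop := out = f_alt l k
instance (l : List Int) (k : Int) (out : Int) : Decidable (Spec_f l k out) := by unfold Spec_f; infer_instance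

-- ===== CLAIM (what is proved, stated in full; the proofs are below) =====
def Claim_equal_f : Prop := ∀ (l : List Int) (k : Int), Dom_f l k → Pre_f l k → Spec_f l k (f l k)

-- ===== LEMMAS AND PROOFS =====

-- A's loop body on (ans, mx) fed with an (index, element) pair.
def Astep (k : Int) (p : Int × Int) (ix : Int × Int) : Int × Int :=
  let mx := max p.2 ix.2
  if PySem.Int.mod (ix.1 + 1) k = 0 then (p.1 + mx * 2, 0) else (p.1, mx)

-- A's loop run from state (a, m) followed by the final `ans += mx * 2`.
def Atot (k : Int) (e : List (Int × Int)) (a m : Int) : Int :=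
  let st := e.foldl (Astep k) (a, m)
  st.1 + st.2 * 2

-- B's value on a descending-sorted list: double each group leader, clamped at 0.
def Bspec (k : Int) : List Int → Int
  | [] => 0
  | x :: t => max x 0 * 2 + Bspec k (t.drop (k - 1).toNat)
termination_by s => s.length
decreasing_by simp

lemma step_mod (i k : Int) (hk : 0 < k) :
    (i + 1) % k = if i % k = k - 1 then 0 else i % k + 1 := by
  have h0 : 0 ≤ i % k := Int.emod_nonneg i (by omega)
  have h1 : i % k < k := Int.emod_lt_of_pos i hk
  have he : (i + 1) % k = (i % k + 1) % k := by
    conv_lhs => rw [Int.add_emod]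
    conv_rhs => rw [Int.add_emod, Int.emod_emod_of_dvd _ dvd_rfl]
  split
  · next h => rw [he, h]; simp
  · next h => rw [he, Int.emod_eq_of_lt (by omega) (by omega)]

lemma bridgeA (s : List Int) (k : Int) :
    (PySem.List.pyRange 0 (s.length : Int) 1).foldl
      (fun (p : Int × Int) (i : Int) =>
        let mx := max p.2 (PySem.List.pyGetD s i 0)
        if PySem.Int.mod (i + 1) k = 0 then (p.1 + mx * 2, 0) else (p.1, mx))
      (0, 0)
    = (PySem.List.enumerate s 0).foldl (Astep k) (0, 0) := by
  rw [PySem.List.enumerate_eq_map_pyRange s 0, List.foldl_map]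
  rfl

lemma main_loop (k : Int) (hk : 1 ≤ k) : ∀ (N : Nat) (s : List Int), s.length ≤ N →
    s.Pairwise (fun a b => b ≤ a) →
    ((∀ i a m : Int, 0 ≤ i → 0 ≤ m → (∀ x ∈ s, x ≤ m) →
        Atot k (PySem.List.enumerate s i) a m
          = a + m * 2 + Bspec k (s.drop (k - PySem.Int.mod i k).toNat))
     ∧ (∀ i a : Int, 0 ≤ i → PySem.Int.mod i k = 0 →
        Atot k (PySem.List.enumerate s i) a 0 = a + Bspec k s)) := by
  have hkpos : (0:Int) < k := by omega
  intro N
  induction N with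
  | zero =>
    intro s hlen _
    have hnil : s = [] := List.eq_nil_of_length_eq_zero (by omega)
    subst hnil
    refine ⟨fun i a m _ _ _ => ?_, fun i a _ _ => ?_⟩ <;>
      simp [Atot, PySem.List.enumerate, Bspec]
  | succ N ih =>
    intro s hlen hsort
    cases s with
    | nil =>
      refine ⟨fun i a m _ _ _ => ?_, fun i a _ _ => ?_⟩ <;>
        simp [Atot, PySem.List.enumerate, Bspec]
    | cons x t =>
      have hlt : t.length ≤ N := by simpa using hlen
      have hx : ∀ y ∈ t, y ≤ x := (List.pairwise_cons.mp hsort).1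
      have ht := ih t hlt (List.pairwise_cons.mp hsort).2
      have hme : ∀ j : Int, PySem.Int.mod j k = j % k :=
        fun j => PySem.Int.mod_eq_emod_of_pos hkpos
      have hr : ∀ i : Int, 0 ≤ PySem.Int.mod i k ∧ PySem.Int.mod i k < k := by
        intro i
        rw [hme]
        exact ⟨Int.emod_nonneg i (by omega), Int.emod_lt_of_pos i hkpos⟩
      constructor
      · intro i a m hi hm hdom
        have hxm : max m x = m := max_eq_left (hdom x (List.mem_cons_self))
        obtain ⟨hr0, hr1⟩ := hr i
        rw [PySem.List.enumerate_cons]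
        by_cases hb : PySem.Int.mod i k = k - 1
        · have hb1 : PySem.Int.mod (i + 1) k = 0 := by
            rw [hme, step_mod i k hkpos, if_pos (by rw [← hme]; exact hb)]
          have step : Astep k (a, m) (i, x) = (a + m * 2, 0) := by
            simp [Astep, hxm, hb1]
          show Atot k ((i, x) :: PySem.List.enumerate t (i + 1)) a m = _
          have : Atot k ((i, x) :: PySem.List.enumerate t (i + 1)) a m
              = Atot k (PySem.List.enumerate t (i + 1)) (a + m * 2) 0 := by
            simp [Atot, step]
          rw [this, ht.2 (i + 1) (a + m * 2) (by omega) hb1]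
          have hdrop : ((k - PySem.Int.mod i k).toNat) = 1 := by omega
          rw [hdrop]
          simp
        · have hb1 : PySem.Int.mod (i + 1) k = PySem.Int.mod i k + 1 := by
            rw [hme, hme, step_mod i k hkpos, if_neg (by rw [← hme]; exact hb)]
          have hb1' : PySem.Int.mod (i + 1) k ≠ 0 := by omega
          have step : Astep k (a, m) (i, x) = (a, m) := by
            simp [Astep, hxm, hb1']
          show Atot k ((i, x) :: PySem.List.enumerate t (i + 1)) a m = _
          have e1 : Atot k ((i, x) :: PySem.List.enumerate t (i + 1)) a m
              = Atot k (PySem.List.enumerate t (i + 1)) a m := by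
            simp [Atot, step]
          rw [e1, ht.1 (i + 1) a m (by omega) hm (fun y hy => hdom y (List.mem_cons_of_mem x hy))]
          have hdrop : (k - PySem.Int.mod i k).toNat = (k - PySem.Int.mod (i + 1) k).toNat + 1 := by
            omega
          rw [hdrop, List.drop_succ_cons]
      · intro i a hi h0
        rw [PySem.List.enumerate_cons]
        by_cases hone : k = 1
        · have hb1 : PySem.Int.mod (i + 1) k = 0 := by
            rw [hme] at h0 ⊢
            rw [step_mod i k hkpos, if_pos (by omega)]
          have step : Astep k (a, 0) (i, x) = (a + max 0 x * 2, 0) := by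
            simp [Astep, hb1]
          have e1 : Atot k ((i, x) :: PySem.List.enumerate t (i + 1)) a 0
              = Atot k (PySem.List.enumerate t (i + 1)) (a + max 0 x * 2) 0 := by
            simp [Atot, step]
          show Atot k ((i, x) :: PySem.List.enumerate t (i + 1)) a 0 = _
          rw [e1, ht.2 (i + 1) _ (by omega) hb1]
          show _ = a + Bspec k (x :: t)
          rw [Bspec]
          rw [hone]
          simp [max_comm]
          ring
        · have hb1 : PySem.Int.mod (i + 1) k = 1 := by
            rw [hme] at h0 ⊢
            rw [step_mod i k hkpos, if_neg (by omega), h0]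
            omega
          have hb1' : PySem.Int.mod (i + 1) k ≠ 0 := by omega
          have step : Astep k (a, 0) (i, x) = (a, max 0 x) := by
            simp [Astep, hb1']
          have e1 : Atot k ((i, x) :: PySem.List.enumerate t (i + 1)) a 0
              = Atot k (PySem.List.enumerate t (i + 1)) a (max 0 x) := by
            simp [Atot, step]
          show Atot k ((i, x) :: PySem.List.enumerate t (i + 1)) a 0 = _
          rw [e1, ht.1 (i + 1) a (max 0 x) (by omega) (le_max_left 0 x)
            (fun y hy => le_trans (hx y hy) (le_max_right 0 x))]
          rw [hb1]
          show _ = a + Bspec k (x :: t)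
          rw [Bspec]
          have : max 0 x = max x 0 := max_comm 0 x
          rw [this]
          ring

lemma pyRange_pos_nil (a b k : Int) (hk : 0 < k) (h : b ≤ a) :
    PySem.List.pyRange a b k = [] := by
  rw [PySem.List.pyRange_of_pos _ _ hk]
  simp [not_lt.mpr h]

lemma pyRange_pos_cons (a b k : Int) (hk : 0 < k) (h : a < b) :
    PySem.List.pyRange a b k = a :: PySem.List.pyRange (a + k) b k := by
  have hx0 : 0 ≤ b - a - 1 := by omega
  have hq0 : 0 ≤ (b - a - 1) / k := Int.ediv_nonneg hx0 (le_of_lt hk)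
  have key : (b - a + k - 1) / k = (b - a - 1) / k + 1 := by
    have h1 : b - a + k - 1 = (b - a - 1) + 1 * k := by ring
    rw [h1, Int.add_mul_ediv_right _ _ (by omega : k ≠ 0)]
  rw [PySem.List.pyRange_of_pos _ _ hk, PySem.List.pyRange_of_pos _ _ hk, if_pos h]
  have hC : ((b - a + k - 1) / k).toNat = ((b - a - 1) / k).toNat + 1 := by omega
  rw [hC, List.range_succ_eq_map, List.map_cons, List.map_map]
  have hC2 : (if a + k < b then ((b - (a + k) + k - 1) / k).toNat else 0)
      = ((b - a - 1) / k).toNat := by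
    split_ifs with h2
    · have he : b - (a + k) + k - 1 = b - a - 1 := by ring
      rw [he]
    · have he : (b - a - 1) / k = 0 := Int.ediv_eq_zero_of_lt hx0 (by omega)
      omega
  rw [hC2]
  refine List.cons_eq_cons.mpr ⟨by simp, ?_⟩
  apply List.map_congr_left
  intro j hj
  simp [Function.comp]
  ring

lemma pyRange_shift (a b k : Int) (hk : 0 < k) :
    PySem.List.pyRange a b k = (PySem.List.pyRange 0 (b - a) k).map (· + a) := by
  rw [PySem.List.pyRange_of_pos _ _ hk, PySem.List.pyRange_of_pos _ _ hk, List.map_map]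
  have hc : (if (0:Int) < b - a then ((b - a - 0 + k - 1) / k).toNat else 0)
      = (if a < b then ((b - a + k - 1) / k).toNat else 0) := by
    split_ifs with h1 h2
    · norm_num
    · exact absurd (by omega : a < b) h2
    · exact absurd (by omega : (0:Int) < b - a) h1
    · rfl
  rw [hc]
  apply List.map_congr_left
  intro j hj
  simp [Function.comp]
  ring

lemma bridgeB (k : Int) (hk : 1 ≤ k) : ∀ (N : Nat) (s : List Int), s.length ≤ N →
    2 * ((PySem.List.pyRange 0 (s.length : Int) k).map
          (fun i => max (PySem.List.pyGetD s i 0) 0)).sum = Bspec k s := by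
  have hkpos : (0:Int) < k := by omega
  intro N
  induction N with
  | zero =>
    intro s hlen
    have hnil : s = [] := List.eq_nil_of_length_eq_zero (by omega)
    subst hnil
    rw [pyRange_pos_nil 0 _ k hkpos (by simp)]
    simp [Bspec]
  | succ N ih =>
    intro s hlen
    cases s with
    | nil =>
      rw [pyRange_pos_nil _ _ k hkpos (by simp)]
      simp [Bspec]
    | cons x t =>
      set d : List Int := t.drop (k - 1).toNat with hd
      have hn : ((x :: t).length : Int) = (t.length : Int) + 1 := by simp
      rw [pyRange_pos_cons 0 _ k hkpos (by omega), List.map_cons]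
      simp only [zero_add]
      rw [pyRange_shift k _ k hkpos, List.map_map]
      have htail : ∀ j ∈ PySem.List.pyRange 0 (((x :: t).length : Int) - k) k,
          ((fun i => max (PySem.List.pyGetD (x :: t) i 0) 0) ∘ (· + k)) j
            = max (PySem.List.pyGetD d j 0) 0 := by
        intro j hj
        have hj0 : 0 ≤ j := ((PySem.List.mem_pyRange_iff_of_pos hkpos j).1 hj).1
        simp only [Function.comp]
        congr 1
        rw [PySem.List.pyGetD_of_nonneg _ _ (by omega), PySem.List.pyGetD_of_nonneg _ _ hj0]
        have h1 : (j + k).toNat = ((k - 1).toNat + 1) + j.toNat := by omega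
        rw [h1]
        have h2 : (x :: t).drop ((k - 1).toNat + 1) = d := by simp [hd]
        rw [List.getD, List.getD, ← h2, List.getElem?_drop]
      rw [List.map_congr_left htail]
      have hrec : 2 * ((PySem.List.pyRange 0 (((x :: t).length : Int) - k) k).map
          (fun j => max (PySem.List.pyGetD d j 0) 0)).sum = Bspec k d := by
        by_cases hkn : k ≤ ((x :: t).length : Int)
        · have hdl : ((d.length : Int)) = ((x :: t).length : Int) - k := by
            simp [hd]
            omega
          rw [← hdl]
          exact ih d (by simp [hd]; omega)
        · have hdnil : d = [] := by
            rw [hn] at hkn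
            rw [hd]
            apply List.drop_eq_nil_of_le
            omega
          rw [pyRange_pos_nil _ _ k hkpos (by omega), hdnil]
          simp [Bspec]
      rw [Bspec]
      simp only [List.sum_cons]
      rw [mul_add, hrec]
      have hhead : max (PySem.List.pyGetD (x :: t) 0 0) 0 = max x 0 := by
        rw [PySem.List.pyGetD_zero_cons]
      rw [hhead, ← hd]
      ring

-- ===== VERDICT (by name: the statement is the Claim_ definition above) =====
theorem f_spec : Claim_equal_f := by
  intro l k _hd hk
  unfold Spec_f f f_alt
  have hk' : (1:Int) ≤ k := hk
  set s := PySem.List.sorted l (fun x => x) true with hs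
  have hlen : s.length = l.length := PySem.List.length_sorted l (fun x => x) true
  have hsorted : s.Pairwise (fun a b => b ≤ a) :=
    PySem.List.sorted_pairwise_rev l (fun x => x)
  simp only [← hlen]
  rw [bridgeA s k]
  have h0 : PySem.Int.mod 0 k = 0 := by
    rw [PySem.Int.mod_eq_emod_of_pos (by omega)]; simp
  have hA : Atot k (PySem.List.enumerate s 0) 0 0 = 0 + Bspec k s :=
    (main_loop k hk' s.length s le_rfl hsorted).2 0 0 le_rfl h0
  have hB := bridgeB k hk' s.length s le_rfl
  simpa [Atot] using hA.trans (by rw [← hB]; ring)
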